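-- pv_equiv track=rewrite | github.com/mohsenph69/Godot-MTerrain-plugin | asset_manager/blender_addons/open_baker_scene.py | find_asset_name_or_first_lod
-- ===== SOURCE A (Python) =====
-- def find_asset_name_or_first_lod(matching_names):
--     empty_parent = [name for name in matching_names if not "_lod" in name and not "_col" in name and not "collision" in name]
--     if empty_parent:
--         return empty_parent[0]
--     else:
--         first_lod = [name for name in matching_names if "_lod" in name]
--         if first_lod:
--             return first_lod[0]
--     return None
-- ===== SOURCE B (Python) =====
-- def find_asset_name_or_first_lod(matching_names):
--     first_lod = None
--     for name in matching_names:
--         if "_lod" not in name and "_col" not in name and "collision" not in name: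
--             return name
--         if first_lod is None and "_lod" in name:
--             first_lod = name
--     return first_lod
-- ===== Notes on version B (the rewrite author's own statement) =====
-- stated objective: simpler
-- what changed: Replaces the two comprehension-based full scans building intermediate lists with one short-circuiting loop that returns the first marker-free name immediately and remembers the first '_lod' name as a fallback.
import Mathlib
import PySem

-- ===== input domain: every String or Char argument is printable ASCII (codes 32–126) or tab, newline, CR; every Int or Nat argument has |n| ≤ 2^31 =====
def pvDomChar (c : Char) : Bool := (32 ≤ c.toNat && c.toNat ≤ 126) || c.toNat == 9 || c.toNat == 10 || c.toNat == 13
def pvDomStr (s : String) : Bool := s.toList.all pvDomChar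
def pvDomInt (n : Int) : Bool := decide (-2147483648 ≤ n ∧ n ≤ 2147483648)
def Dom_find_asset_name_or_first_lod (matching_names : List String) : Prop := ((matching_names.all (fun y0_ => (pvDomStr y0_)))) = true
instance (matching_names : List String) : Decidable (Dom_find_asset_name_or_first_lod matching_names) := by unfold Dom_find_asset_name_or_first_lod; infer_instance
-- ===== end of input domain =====

-- B replaces A's two comprehension scans with one early-exiting loop that tracks the first '_lod' fallback (simpler single pass, no intermediate lists).

-- ===== PORT A =====
def find_asset_name_or_first_lod (matching_names : List String) : Option String :=
  let empty_parent := matching_names.filter (fun name =>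
    !(PySem.Str.isIn "_lod" name) && !(PySem.Str.isIn "_col" name) && !(PySem.Str.isIn "collision" name))
  if empty_parent ≠ [] then empty_parent.head?
  else
    let first_lod := matching_names.filter (fun name => PySem.Str.isIn "_lod" name)
    if first_lod ≠ [] then first_lod.head?
    else none

-- ===== PORT B =====
def find_asset_name_or_first_lod_alt_go (first_lod : Option String) : List String → Option String
  | [] => first_lod
  | name :: rest =>
    if !(PySem.Str.isIn "_lod" name) && !(PySem.Str.isIn "_col" name) && !(PySem.Str.isIn "collision" name) then
      some name
    else
      find_asset_name_or_first_lod_alt_go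
        (if first_lod.isNone && PySem.Str.isIn "_lod" name then some name else first_lod) rest

def find_asset_name_or_first_lod_alt (matching_names : List String) : Option String :=
  find_asset_name_or_first_lod_alt_go none matching_names

-- ===== PRECONDITION & SPEC =====
def Spec_find_asset_name_or_first_lod (matching_names : List String) (out : Option String) : Prop := out = find_asset_name_or_first_lod_alt matching_names
instance (matching_names : List String) (out : Option String) : Decidable (Spec_find_asset_name_or_first_lod matching_names out) := by unfold Spec_find_asset_name_or_first_lod; infer_instance

-- ===== CLAIM (what is proved, stated in full; the proofs are below) =====
def Claim_equal_find_asset_name_or_first_lod : Prop := ∀ (matching_names : List String), Dom_find_asset_name_or_first_lod matching_names → Spec_find_asset_name_or_first_lod matching_names (find_asset_name_or_first_lod matching_names)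

-- ===== LEMMAS AND PROOFS =====

def pvClean (name : String) : Bool :=
  !(PySem.Str.isIn "_lod" name) && !(PySem.Str.isIn "_col" name) && !(PySem.Str.isIn "collision" name)

def pvHasLod (name : String) : Bool := PySem.Str.isIn "_lod" name

lemma go_characterization (l : List String) : ∀ fl : Option String,
    find_asset_name_or_first_lod_alt_go fl l =
      match (l.filter pvClean).head? with
      | some x => some x
      | none => fl.orElse (fun _ => (l.filter pvHasLod).head?) := by
  induction l with
  | nil => intro fl; cases fl <;> rfl
  | cons name rest ih =>
    intro fl
    cases hc : (!(PySem.Str.isIn "_lod" name) && !(PySem.Str.isIn "_col" name) && !(PySem.Str.isIn "collision" name)) with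
    | true =>
      have hc' : pvClean name = true := hc
      simp only [find_asset_name_or_first_lod_alt_go]
      rw [hc]
      simp [hc']
    | false =>
      have hc' : pvClean name = false := hc
      simp only [find_asset_name_or_first_lod_alt_go]
      rw [hc]
      simp only [Bool.false_eq_true, if_false, ih, List.filter_cons, hc']
      cases h2 : (rest.filter pvClean).head? with
      | some x => rfl
      | none =>
        cases fl with
        | some v => rfl
        | none =>
          cases hl : PySem.Str.isIn "_lod" name with
          | true =>
            have hl2 : pvHasLod name = true := hl
            simp [hl2, Option.orElse]
          | false =>
            have hl2 : pvHasLod name = false := hl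
            simp [hl2, Option.orElse]

-- ===== VERDICT (by name: the statement is the Claim_ definition above) =====
theorem find_asset_name_or_first_lod_spec : Claim_equal_find_asset_name_or_first_lod := by
  intro l _
  unfold Spec_find_asset_name_or_first_lod find_asset_name_or_first_lod find_asset_name_or_first_lod_alt
  rw [go_characterization]
  have e1 : l.filter (fun name =>
      !(PySem.Str.isIn "_lod" name) && !(PySem.Str.isIn "_col" name) && !(PySem.Str.isIn "collision" name))
      = l.filter pvClean := rfl
  have e2 : l.filter (fun name => PySem.Str.isIn "_lod" name) = l.filter pvHasLod := rfl
  simp only [e1, e2]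
  cases hf : l.filter pvClean with
  | cons x t => simp
  | nil =>
    simp only [ne_eq, not_true_eq_false, if_false, List.head?_nil, Option.orElse]
    cases hg : l.filter pvHasLod with
    | nil => simp
    | cons y t => simp
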